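-- pv_equiv track=rewrite | github.com/Book-Driven-Developers/25-OperatingSystem | week5/김주왕/lab5_thrashing_and_frame_allocation.py | lru_fault_count
-- ===== SOURCE A (Python) =====
-- from collections import OrderedDict
-- from typing import List, Set, Tuple
--
-- def lru_fault_count(pages: List[int], frame_size: int) -> int:
--     """
--     LRU 기준으로 page fault 개수를 센다.
--     - frame_size가 작을수록 보통 fault가 커짐
--     """
--     frames = OrderedDict()
--     faults = 0
--
--     for p in pages:
--         if p in frames:
--             frames.move_to_end(p)  # 최근 사용 갱신
--         else:
--             faults += 1
--             if len(frames) >= frame_size: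
--                 frames.popitem(last=False)  # LRU 제거
--             frames[p] = True
--     return faults
-- ===== SOURCE B (Python) =====
-- def lru_fault_count(pages, frame_size):
--     last = {}          # page -> time of its most recent access
--     faults = 0
--     for t, p in enumerate(pages):
--         if p not in last:
--             faults += 1
--             if len(last) >= frame_size:
--                 victim = min(last, key=last.get)   # smallest timestamp = LRU
--                 del last[victim]
--         last[p] = t
--     return faults
-- ===== Notes on version B (the rewrite author's own statement) =====
-- stated objective: alternative
-- what changed: Replaces A's recency-ordered OrderedDict queue (move_to_end / popitem) by a plain page->last-access-timestamp dict, evicting the page with the smallest timestamp found by a min scan.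
-- outside the precondition, e.g. on lru_fault_count([1], 0): A raises KeyError, B raises ValueError
import Mathlib
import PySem

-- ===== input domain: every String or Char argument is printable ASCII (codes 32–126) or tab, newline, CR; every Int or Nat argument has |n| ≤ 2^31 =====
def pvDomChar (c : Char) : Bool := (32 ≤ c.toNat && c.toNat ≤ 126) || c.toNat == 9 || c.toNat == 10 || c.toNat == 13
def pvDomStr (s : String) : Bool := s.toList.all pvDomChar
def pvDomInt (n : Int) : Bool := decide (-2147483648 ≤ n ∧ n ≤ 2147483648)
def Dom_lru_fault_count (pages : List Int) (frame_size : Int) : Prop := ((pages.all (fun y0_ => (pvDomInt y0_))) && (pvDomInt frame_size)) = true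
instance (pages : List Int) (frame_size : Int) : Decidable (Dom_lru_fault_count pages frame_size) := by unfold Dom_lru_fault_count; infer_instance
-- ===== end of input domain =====

-- B replaces A's recency-ordered OrderedDict queue by a page → last-access-time map,
-- evicting by a min-timestamp scan over the cached pages (objective: alternative data structure).

-- ===== PORT A =====
-- one iteration of A's `for p in pages` loop; state = (frames, faults)
def lruStepA (frame_size : Int) (st : PySem.Dict Int Bool × Int) (p : Int) :
    PySem.Dict Int Bool × Int :=
  match st.1.get? p with
  | some v => ((st.1.erase p).insert p v, st.2)    -- frames.move_to_end(p): re-insert at the end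
  | none =>
      let faults := st.2 + 1
      let frames :=
        if frame_size ≤ (st.1.size : Int)
        then PySem.Dict.mk (st.1.items.drop 1)      -- frames.popitem(last=False); Pre_ keeps this off the empty dict (KeyError)
        else st.1
      (frames.insert p true, faults)

def lru_fault_count (pages : List Int) (frame_size : Int) : Int :=
  (pages.foldl (lruStepA frame_size) (PySem.Dict.empty, 0)).2

-- ===== PORT B =====
-- min(last, key=last.get): first key of minimal value; Pre_ keeps this off the empty dict (ValueError)
def lruMin (items : List (Int × Int)) : Int × Int :=
  items.foldl (fun best q => if q.2 < best.2 then q else best) (items.headD (0, 0))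

-- one iteration of B's loop; state = (last, faults, t)
def lruStepB (frame_size : Int) (st : PySem.Dict Int Int × Int × Int) (p : Int) :
    PySem.Dict Int Int × Int × Int :=
  if st.1.contains p then (st.1.insert p st.2.2, st.2.1, st.2.2 + 1)
  else
    let last :=
      if frame_size ≤ (st.1.size : Int)
      then st.1.erase (lruMin st.1.items).1
      else st.1
    (last.insert p st.2.2, st.2.1 + 1, st.2.2 + 1)

def lru_fault_count_alt (pages : List Int) (frame_size : Int) : Int :=
  (pages.foldl (lruStepB frame_size) (PySem.Dict.empty, 0, 0)).2.1

-- ===== PRECONDITION & SPEC =====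
-- Pre_ excludes nonempty page lists with frame_size ≤ 0: there A raises KeyError
-- (popitem on an empty OrderedDict) and B raises ValueError (min of an empty dict).
def Pre_lru_fault_count (pages : List Int) (frame_size : Int) : Prop :=
  pages = [] ∨ 1 ≤ frame_size
instance (pages : List Int) (frame_size : Int) : Decidable (Pre_lru_fault_count pages frame_size) := by
  unfold Pre_lru_fault_count; infer_instance

def pvWitness_lru_fault_count : List Int × Int := ([1, 2, 3, 1, 4, 2], 2)

def Spec_lru_fault_count (pages : List Int) (frame_size : Int) (out : Int) : Prop := out = lru_fault_count_alt pages frame_size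
instance (pages : List Int) (frame_size : Int) (out : Int) : Decidable (Spec_lru_fault_count pages frame_size out) := by unfold Spec_lru_fault_count; infer_instance

-- ===== CLAIM (what is proved, stated in full; the proofs are below) =====
def Claim_equal_lru_fault_count : Prop := ∀ (pages : List Int) (frame_size : Int), Dom_lru_fault_count pages frame_size → Pre_lru_fault_count pages frame_size → Spec_lru_fault_count pages frame_size (lru_fault_count pages frame_size)


-- ===== LEMMAS AND PROOFS =====

theorem lruFind?_filter_ne {v : Type} (l : List (Int × v)) (k k' : Int) (h : k' ≠ k) :
    (l.filter (fun p => !(p.1 == k))).find? (fun p => p.1 == k') = l.find? (fun p => p.1 == k') := by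
  induction l with
  | nil => rfl
  | cons a l ih =>
      by_cases hak : a.1 = k
      · have h2 : (k == k') = false := by simp; exact fun e => h e.symm
        simp [hak, h2, ih]
      · by_cases hak' : a.1 = k'
        · simp [hak', h]
        · simp [hak, hak', ih]

theorem lruGet?_erase {v : Type} (d : PySem.Dict Int v) (k k' : Int) :
    (d.erase k).get? k' = if k' = k then none else d.get? k' := by
  by_cases h : k' = k
  · subst h
    simp only [PySem.Dict.get?, PySem.Dict.erase]
    rw [List.find?_eq_none.mpr]
    · rfl
    · intro x hx
      have := (List.mem_filter.mp hx).2
      simp at this ⊢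
      exact this
  · simp only [PySem.Dict.get?, PySem.Dict.erase, if_neg h]
    rw [lruFind?_filter_ne _ _ _ h]

theorem lruGetD_erase_of_ne {v : Type} (d : PySem.Dict Int v) (k k' : Int) (d0 : v) (h : k' ≠ k) :
    (d.erase k).getD k' d0 = d.getD k' d0 := by
  simp [PySem.Dict.getD, lruGet?_erase, h]

theorem lruContains_erase {v : Type} (d : PySem.Dict Int v) (k k' : Int) :
    (d.erase k).contains k' = (decide (k' ≠ k) && d.contains k') := by
  rw [PySem.Dict.contains_eq_isSome_get?, PySem.Dict.contains_eq_isSome_get?, lruGet?_erase]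
  by_cases h : k' = k <;> simp [h]

theorem lruKeys_erase {v : Type} (d : PySem.Dict Int v) (k : Int) :
    (d.erase k).keys = d.keys.filter (fun x => !(x == k)) := by
  simpa [PySem.Dict.erase, PySem.Dict.keys] using
    (List.filter_map (f := Prod.fst) (p := fun x => !(x == k)) (l := d.items)).symm

theorem lruContains_false_iff {v : Type} (d : PySem.Dict Int v) (k : Int) :
    d.contains k = false ↔ k ∉ d.keys := by
  rw [← PySem.Dict.contains_iff_mem_keys]
  cases h : d.contains k <;> simp

theorem lruSize_eq (fa : PySem.Dict Int Bool) (fb : PySem.Dict Int Int)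
    (h1 : fa.keys.Nodup) (h2 : fb.keys.Nodup)
    (hc : ∀ k, fb.contains k = true ↔ k ∈ fa.keys) : fb.size = fa.size := by
  have hperm : fb.keys.Perm fa.keys := by
    rw [List.perm_ext_iff_of_nodup h2 h1]
    intro a
    rw [← hc a, PySem.Dict.contains_iff_mem_keys]
  have hlen : fb.keys.length = fa.keys.length := hperm.length_eq
  simpa [PySem.Dict.keys, PySem.Dict.size] using hlen

theorem lruFoldl_min_eq (m : Int × Int) (l : List (Int × Int)) :
    ∀ (a : Int × Int), (a = m ∨ m ∈ l) →
      (∀ q, q = a ∨ q ∈ l → m.2 ≤ q.2 ∧ (q.2 = m.2 → q = m)) →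
      l.foldl (fun best q => if q.2 < best.2 then q else best) a = m := by
  induction l with
  | nil =>
      rintro a (rfl | h) _
      · rfl
      · cases h
  | cons q l ih =>
      intro a ha hq
      simp only [List.foldl_cons]
      have haq : (if q.2 < a.2 then q else a) = m ∨ m ∈ l := by
        rcases ha with rfl | hm
        · -- a = m
          left
          have hle := (hq q (Or.inr (List.mem_cons_self))).1
          rw [if_neg (by omega)]
        · rcases List.mem_cons.mp hm with heq | hm'
          · by_cases hlt : q.2 < a.2
            · left; rw [if_pos hlt, ← heq]
            · have h1 := (hq a (Or.inl rfl)).1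
              have h3 : q.2 = m.2 := by rw [← heq]
              left
              rw [if_neg hlt]
              exact (hq a (Or.inl rfl)).2 (by omega)
          · right; exact hm'
      apply ih _ haq
      intro r hr
      apply hq
      rcases hr with rfl | hr'
      · by_cases hlt : q.2 < a.2
        · rw [if_pos hlt]; exact Or.inr (List.mem_cons_self)
        · rw [if_neg hlt]; exact Or.inl rfl
      · exact Or.inr (List.mem_cons.mpr (Or.inr hr'))

theorem lruMin_eq (l : List (Int × Int)) (m : Int × Int) (hm : m ∈ l)
    (hq : ∀ q ∈ l, m.2 ≤ q.2 ∧ (q.2 = m.2 → q = m)) : lruMin l = m := by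
  match l with
  | i0 :: irest =>
      unfold lruMin
      simp only [List.headD_cons, List.foldl_cons, lt_irrefl, if_false]
      apply lruFoldl_min_eq m irest i0
      · rcases List.mem_cons.mp hm with rfl | h
        · exact Or.inl rfl
        · exact Or.inr h
      · intro q hr
        apply hq
        rcases hr with rfl | hr'
        · exact List.mem_cons_self
        · exact List.mem_cons.mpr (Or.inr hr')

-- The simulation invariant: A's frames and B's (last, t) describe the same cache,
-- A's insertion order = increasing order of B's timestamps, all timestamps < t.
def LruInv (fa : PySem.Dict Int Bool) (fb : PySem.Dict Int Int) (t : Int) : Prop :=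
  fa.keys.Nodup ∧ fb.keys.Nodup ∧
  (∀ k, fb.contains k = true ↔ k ∈ fa.keys) ∧
  (∀ k ∈ fa.keys, fb.getD k 0 < t) ∧
  (fa.keys.map (fun k => fb.getD k 0)).Pairwise (· < ·)

theorem lruInv_empty : LruInv PySem.Dict.empty PySem.Dict.empty 0 := by
  refine ⟨by simp [pysem], by simp [pysem], by simp [pysem], by simp [pysem], by simp [pysem]⟩

theorem lru_step (frame_size : Int) (hfs : 1 ≤ frame_size)
    (fa : PySem.Dict Int Bool) (fb : PySem.Dict Int Int) (t faults : Int) (p : Int)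
    (h : LruInv fa fb t) :
    ∃ fa' fb' F, lruStepA frame_size (fa, faults) p = (fa', F) ∧
      lruStepB frame_size (fb, faults, t) p = (fb', F, t + 1) ∧
      LruInv fa' fb' (t + 1) := by
  obtain ⟨hndA, hndB, hcont, hlt, hpw⟩ := h
  by_cases hcp : fa.contains p = true
  · -- HIT: p is cached
    obtain ⟨v, hv⟩ : ∃ v, fa.get? p = some v := by
      have h1 := PySem.Dict.contains_eq_isSome_get? fa p
      rw [hcp] at h1
      cases hgv : fa.get? p
      · rw [hgv] at h1; simp at h1
      · exact ⟨_, rfl⟩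
    have hbp : fb.contains p = true := (hcont p).mpr ((PySem.Dict.contains_iff_mem_keys fa p).mp hcp)
    refine ⟨(fa.erase p).insert p v, fb.insert p t, faults, ?_, ?_, ?_⟩
    · simp [lruStepA, hv]
    · simp [lruStepB, hbp]
    · have hkA : ((fa.erase p).insert p v).keys = (fa.keys.filter (fun x => !(x == p))) ++ [p] := by
        rw [PySem.Dict.keys_insert_of_not_contains, lruKeys_erase]
        simp [lruContains_erase]
      have hmemf : ∀ k, k ∈ fa.keys.filter (fun x => !(x == p)) ↔ k ∈ fa.keys ∧ k ≠ p := by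
        intro k; simp [List.mem_filter]
      refine ⟨?_, PySem.Dict.nodup_keys_insert fb p t hndB, ?_, ?_, ?_⟩
      · rw [hkA]
        refine List.Nodup.append (hndA.filter _) (List.nodup_singleton p) ?_
        intro k hk1 hk2
        rcases List.mem_singleton.mp hk2 with rfl
        exact ((hmemf k).mp hk1).2 rfl
      · intro k
        rw [PySem.Dict.contains_insert, hkA]
        constructor
        · intro hk
          rcases Bool.or_eq_true_iff.mp hk with hk | hk
          · simp at hk; subst hk; simp
          · rcases eq_or_ne k p with rfl | hne
            · simp
            · exact List.mem_append.mpr (Or.inl ((hmemf k).mpr ⟨(hcont k).mp hk, hne⟩))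
        · intro hk
          rcases List.mem_append.mp hk with hk | hk
          · exact Bool.or_eq_true_iff.mpr (Or.inr ((hcont k).mpr ((hmemf k).mp hk).1))
          · rcases List.mem_singleton.mp hk; simp
      · intro k hk
        rw [hkA] at hk
        rw [PySem.Dict.getD_insert]
        rcases List.mem_append.mp hk with hk | hk
        · obtain ⟨hmem, hne⟩ := (hmemf k).mp hk
          rw [if_neg hne]
          have := hlt k hmem; omega
        · rcases List.mem_singleton.mp hk; rw [if_pos rfl]; omega
      · rw [hkA, List.map_append]
        have hmapeq : (fa.keys.filter (fun x => !(x == p))).map (fun k => (fb.insert p t).getD k 0)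
            = (fa.keys.filter (fun x => !(x == p))).map (fun k => fb.getD k 0) := by
          apply List.map_congr_left
          intro k hk
          rw [PySem.Dict.getD_insert, if_neg ((hmemf k).mp hk).2]
        rw [List.pairwise_append]
        refine ⟨?_, by simp, ?_⟩
        · rw [hmapeq]
          exact hpw.sublist (List.filter_sublist.map _)
        · intro a ha b hb
          rw [hmapeq] at ha
          simp only [List.map_cons, List.map_nil, List.mem_singleton] at hb
          rw [hb, PySem.Dict.getD_insert, if_pos rfl]
          obtain ⟨k, hk, rfl⟩ := List.mem_map.mp ha
          exact hlt k ((hmemf k).mp hk).1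
  · -- MISS: p is not cached
    have hcp' : fa.contains p = false := by cases h' : fa.contains p; rfl; exact absurd h' hcp
    have hget : fa.get? p = none := (PySem.Dict.get?_eq_none_iff_contains fa p).mpr hcp'
    have hpa : p ∉ fa.keys := (lruContains_false_iff fa p).mp hcp'
    have hbp : fb.contains p = false := by
      cases h' : fb.contains p
      · rfl
      · exact absurd ((hcont p).mp h') hpa
    have hsz : fb.size = fa.size := lruSize_eq fa fb hndA hndB hcont
    by_cases hcap : frame_size ≤ (fa.size : Int)
    · -- miss with eviction
      obtain ⟨j0, jrest, hitems⟩ : ∃ j0 jrest, fa.items = j0 :: jrest := by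
        cases h' : fa.items with
        | nil =>
            exfalso
            have : fa.size = 0 := by simp [PySem.Dict.size, h']
            rw [this] at hcap; simp at hcap; omega
        | cons j0 jrest => exact ⟨j0, jrest, rfl⟩
      have hka : fa.keys = j0.1 :: jrest.map Prod.fst := by
        simp [PySem.Dict.keys, hitems]
      -- the LRU victim on B's side is the head key of A's queue
      obtain ⟨v0, hv0⟩ : ∃ v0, fb.get? j0.1 = some v0 := by
        have h1 : fb.contains j0.1 = true := (hcont j0.1).mpr (by rw [hka]; simp)
        rw [PySem.Dict.contains_eq_isSome_get?] at h1
        cases hgv : fb.get? j0.1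
        · rw [hgv] at h1; simp at h1
        · exact ⟨_, rfl⟩
      have hgd0 : fb.getD j0.1 0 = v0 := by simp [PySem.Dict.getD, hv0]
      have hmem0 : (j0.1, v0) ∈ fb.items := (PySem.Dict.get?_eq_some_iff_mem_items fb _ _ hndB).mp hv0
      have hrest_lt : ∀ k ∈ jrest.map Prod.fst, fb.getD j0.1 0 < fb.getD k 0 := by
        have := hpw
        rw [hka, List.map_cons, List.pairwise_cons] at this
        intro k hk
        exact this.1 _ (List.mem_map_of_mem hk)
      have hvic : lruMin fb.items = (j0.1, v0) := by
        apply lruMin_eq _ _ hmem0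
        intro q hq
        have hqk : q.1 ∈ fa.keys := by
          have h1 : q.1 ∈ fb.keys := by
            simp only [PySem.Dict.keys]
            exact List.mem_map_of_mem hq
          exact (hcont q.1).mp ((PySem.Dict.contains_iff_mem_keys fb q.1).mpr h1)
        have hq2 : fb.getD q.1 0 = q.2 := PySem.Dict.getD_of_mem_items fb hq hndB 0
        rcases eq_or_ne q.1 j0.1 with he | hne
        · have : q.2 = v0 := by rw [← hq2, he, hgd0]
          constructor
          · omega
          · intro _
            have : q = (q.1, q.2) := rfl
            rw [this, he]; simp [‹q.2 = v0›]
        · have hkr : q.1 ∈ jrest.map Prod.fst := by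
            rw [hka] at hqk
            rcases List.mem_cons.mp hqk with he' | h'
            · exact absurd he' hne
            · exact h'
          have := hrest_lt q.1 hkr
          rw [hgd0, hq2] at this
          constructor
          · omega
          · intro he'; omega
      have hcapb : frame_size ≤ (fb.size : Int) := by rw [hsz]; exact hcap
      -- new key lists
      have hprest : p ∉ jrest.map Prod.fst := by rw [hka] at hpa; simp at hpa; simpa using hpa.2
      have hj0rest : j0.1 ∉ jrest.map Prod.fst := by
        rw [hka] at hndA; exact (List.nodup_cons.mp hndA).1
      have hrestnd : (jrest.map Prod.fst).Nodup := by
        rw [hka] at hndA; exact (List.nodup_cons.mp hndA).2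
      have hkmk : (PySem.Dict.mk jrest).keys = jrest.map Prod.fst := rfl
      have hcontmk : (PySem.Dict.mk jrest).contains p = false := by
        rw [lruContains_false_iff, hkmk]; exact hprest
      have hkA : ((PySem.Dict.mk jrest).insert p true).keys = jrest.map Prod.fst ++ [p] :=
        PySem.Dict.keys_insert_of_not_contains _ _ hcontmk
      refine ⟨(PySem.Dict.mk jrest).insert p true, (fb.erase j0.1).insert p t, faults + 1, ?_, ?_, ?_⟩
      · simp [lruStepA, hget, hcap, hitems]
      · simp [lruStepB, hbp, hcapb, hvic]
      · have hgd' : ∀ k, k ≠ p → k ≠ j0.1 →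
            ((fb.erase j0.1).insert p t).getD k 0 = fb.getD k 0 := by
          intro k hk1 hk2
          rw [PySem.Dict.getD_insert, if_neg hk1, lruGetD_erase_of_ne _ _ _ _ hk2]
        have hndB' : ((fb.erase j0.1).insert p t).keys.Nodup := by
          apply PySem.Dict.nodup_keys_insert
          rw [lruKeys_erase]
          exact hndB.filter _
        refine ⟨?_, hndB', ?_, ?_, ?_⟩
        · rw [hkA]
          refine List.Nodup.append hrestnd (List.nodup_singleton p) ?_
          intro k hk1 hk2
          rcases List.mem_singleton.mp hk2 with rfl
          exact hprest hk1
        · intro k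
          rw [PySem.Dict.contains_insert, lruContains_erase, hkA]
          constructor
          · intro hk
            rcases Bool.or_eq_true_iff.mp hk with hk | hk
            · simp at hk; subst hk; simp
            · rcases Bool.and_eq_true_iff.mp hk with ⟨hk1, hk2⟩
              have hne : k ≠ j0.1 := of_decide_eq_true hk1
              have : k ∈ fa.keys := (hcont k).mp hk2
              rw [hka] at this
              rcases List.mem_cons.mp this with he | h'
              · exact absurd he hne
              · exact List.mem_append.mpr (Or.inl h')
          · intro hk
            rcases List.mem_append.mp hk with hk | hk
            · apply Bool.or_eq_true_iff.mpr; right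
              apply Bool.and_eq_true_iff.mpr
              refine ⟨decide_eq_true ?_, (hcont k).mpr (by rw [hka]; exact List.mem_cons.mpr (Or.inr hk))⟩
              intro he; rw [he] at hk; exact hj0rest hk
            · rcases List.mem_singleton.mp hk; simp
        · intro k hk
          rw [hkA] at hk
          rcases List.mem_append.mp hk with hk | hk
          · have hk1 : k ≠ p := fun he => hprest (he ▸ hk)
            have hk2 : k ≠ j0.1 := fun he => hj0rest (he ▸ hk)
            rw [hgd' k hk1 hk2]
            have : k ∈ fa.keys := by rw [hka]; exact List.mem_cons.mpr (Or.inr hk)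
            have := hlt k this; omega
          · rcases List.mem_singleton.mp hk
            rw [PySem.Dict.getD_insert, if_pos rfl]; omega
        · rw [hkA, List.map_append]
          have hmapeq : (jrest.map Prod.fst).map (fun k => ((fb.erase j0.1).insert p t).getD k 0)
              = (jrest.map Prod.fst).map (fun k => fb.getD k 0) := by
            apply List.map_congr_left
            intro k hk
            exact hgd' k (fun he => hprest (he ▸ hk)) (fun he => hj0rest (he ▸ hk))
          rw [List.pairwise_append]
          refine ⟨?_, by simp, ?_⟩
          · rw [hmapeq]
            have hsub : List.Sublist ((jrest.map Prod.fst).map (fun k => fb.getD k 0))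
                (fa.keys.map (fun k => fb.getD k 0)) := by
              rw [hka]
              exact ((jrest.map Prod.fst).sublist_cons_self j0.1).map _
            exact hpw.sublist hsub
          · intro a ha b hb
            rw [hmapeq] at ha
            simp only [List.map_cons, List.map_nil, List.mem_singleton] at hb
            rw [hb, PySem.Dict.getD_insert, if_pos rfl]
            obtain ⟨k, hk, rfl⟩ := List.mem_map.mp ha
            have : k ∈ fa.keys := by rw [hka]; exact List.mem_cons.mpr (Or.inr hk)
            exact hlt k this
    · -- miss without eviction
      have hcapb : ¬ frame_size ≤ (fb.size : Int) := by rw [hsz]; exact hcap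
      have hkA : (fa.insert p true).keys = fa.keys ++ [p] :=
        PySem.Dict.keys_insert_of_not_contains _ _ hcp'
      refine ⟨fa.insert p true, fb.insert p t, faults + 1, ?_, ?_, ?_⟩
      · simp [lruStepA, hget, hcap]
      · simp [lruStepB, hbp, hcapb]
      · refine ⟨?_, PySem.Dict.nodup_keys_insert fb p t hndB, ?_, ?_, ?_⟩
        · rw [hkA]
          refine List.Nodup.append hndA (List.nodup_singleton p) ?_
          intro k hk1 hk2
          rcases List.mem_singleton.mp hk2 with rfl
          exact hpa hk1
        · intro k
          rw [PySem.Dict.contains_insert, hkA]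
          constructor
          · intro hk
            rcases Bool.or_eq_true_iff.mp hk with hk | hk
            · simp at hk; subst hk; simp
            · exact List.mem_append.mpr (Or.inl ((hcont k).mp hk))
          · intro hk
            rcases List.mem_append.mp hk with hk | hk
            · exact Bool.or_eq_true_iff.mpr (Or.inr ((hcont k).mpr hk))
            · rcases List.mem_singleton.mp hk; simp
        · intro k hk
          rw [hkA] at hk
          rw [PySem.Dict.getD_insert]
          rcases List.mem_append.mp hk with hk | hk
          · have hknep : k ≠ p := fun he => hpa (he ▸ hk)
            rw [if_neg hknep]
            have := hlt k hk; omega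
          · rcases List.mem_singleton.mp hk; rw [if_pos rfl]; omega
        · rw [hkA, List.map_append]
          have hmapeq : fa.keys.map (fun k => (fb.insert p t).getD k 0)
              = fa.keys.map (fun k => fb.getD k 0) := by
            apply List.map_congr_left
            intro k hk
            have hknep : k ≠ p := fun he => hpa (he ▸ hk)
            rw [PySem.Dict.getD_insert, if_neg hknep]
          rw [List.pairwise_append]
          refine ⟨by rw [hmapeq]; exact hpw, by simp, ?_⟩
          intro a ha b hb
          rw [hmapeq] at ha
          simp only [List.map_cons, List.map_nil, List.mem_singleton] at hb
          rw [hb, PySem.Dict.getD_insert, if_pos rfl]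
          obtain ⟨k, hk, rfl⟩ := List.mem_map.mp ha
          exact hlt k hk

theorem lru_loop (frame_size : Int) (hfs : 1 ≤ frame_size) (pages : List Int) :
    ∀ (fa : PySem.Dict Int Bool) (fb : PySem.Dict Int Int) (t faults : Int),
      LruInv fa fb t →
      (pages.foldl (lruStepA frame_size) (fa, faults)).2
        = (pages.foldl (lruStepB frame_size) (fb, faults, t)).2.1 := by
  induction pages with
  | nil => intro fa fb t faults _; rfl
  | cons p rest ih =>
      intro fa fb t faults h
      obtain ⟨fa', fb', F, hA, hB, hInv⟩ := lru_step frame_size hfs fa fb t faults p h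
      simp only [List.foldl_cons, hA, hB]
      exact ih fa' fb' (t + 1) F hInv

-- ===== VERDICT (by name: the statement is the Claim_ definition above) =====
theorem lru_fault_count_spec : Claim_equal_lru_fault_count := by
  intro pages frame_size _ hpre
  unfold Spec_lru_fault_count lru_fault_count lru_fault_count_alt
  rcases hpre with h | h
  · subst h; rfl
  · exact lru_loop frame_size h pages _ _ 0 0 lruInv_empty
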